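-- pv_equiv track=rewrite | github.com/scarrygarry001/DAA | DAA-LAB-1.py | sort_and_alternate
-- ===== SOURCE A (Python) =====
-- def sort_and_alternate(arr):
--     arr.sort()
--     n = len(arr)
--     output = []
--
--     i, j = 0, n-1
--     while i <= j:
--         if i == j:
--             output.append(arr[i])
--         else:
--             output.append(arr[i])
--             output.append(arr[j])
--         i += 1
--         j -= 1
--
--     return output
-- ===== SOURCE B (Python) =====
-- from itertools import zip_longest
--
-- _PAD = object()
--
-- def sort_and_alternate(arr):
--     arr.sort()
--     front = arr[:(len(arr) + 1) // 2]
--     back = arr[(len(arr) + 1) // 2:][::-1]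
--     output = []
--     for a, b in zip_longest(front, back, fillvalue=_PAD):
--         output.append(a)
--         if b is not _PAD:
--             output.append(b)
--     return output
-- ===== Notes on version B (the rewrite author's own statement) =====
-- stated objective: alternative
-- what changed: Replaces the two-index while loop with indexed appends by slicing the sorted list into a front half and a reversed back half and interleaving them with zip_longest, dropping the odd-length pad.
import Mathlib
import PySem

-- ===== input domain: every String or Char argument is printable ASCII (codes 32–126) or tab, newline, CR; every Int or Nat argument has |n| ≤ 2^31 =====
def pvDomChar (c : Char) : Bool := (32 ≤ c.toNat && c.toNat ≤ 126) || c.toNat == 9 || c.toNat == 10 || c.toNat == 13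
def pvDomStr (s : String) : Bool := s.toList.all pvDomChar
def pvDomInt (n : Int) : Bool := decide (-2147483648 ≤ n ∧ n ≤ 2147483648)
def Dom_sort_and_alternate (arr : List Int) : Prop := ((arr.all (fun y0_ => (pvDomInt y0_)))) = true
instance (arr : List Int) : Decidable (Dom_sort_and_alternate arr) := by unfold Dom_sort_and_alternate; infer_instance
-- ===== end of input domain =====

-- B replaces A's two-index while loop by slicing the sorted list into a front half and a
-- reversed back half and interleaving them (zip_longest, odd pad dropped); same cost.
-- Both A and B sort `arr` in place; the equivalence proved is about the RETURN value.

-- ===== PORT A =====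
-- A's while loop: i from the left, j from the right, appending arr[i] (and arr[j] when i ≠ j).
def pvALoop (s : List Int) (i j : Int) (out : List Int) : List Int :=
  if i ≤ j then
    pvALoop s (i + 1) (j - 1)
      (if i = j then out ++ [PySem.List.pyGetD s i 0]
       else out ++ [PySem.List.pyGetD s i 0, PySem.List.pyGetD s j 0])
  else out
termination_by (j - i + 1).toNat
decreasing_by omega

def sort_and_alternate (arr : List Int) : List Int :=
  let s := PySem.List.sorted arr (fun x => x) false   -- arr.sort()
  pvALoop s 0 ((s.length : Int) - 1) []

-- ===== PORT B =====
-- zip_longest(front, back, fillvalue=PAD) flattened, skipping the PAD (which can only pad `back`).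
def pvInterleave : List Int → List Int → List Int
  | [], bs => bs
  | a :: fs, [] => a :: fs
  | a :: fs, b :: bs => a :: b :: pvInterleave fs bs

def sort_and_alternate_alt (arr : List Int) : List Int :=
  let s := PySem.List.sorted arr (fun x => x) false   -- arr.sort()
  let h := PySem.Int.floordiv ((s.length : Int) + 1) 2
  let front := PySem.List.slice s none (some h)            -- arr[:(n+1)//2]
  let back := (PySem.List.slice s (some h) none).reverse   -- arr[(n+1)//2:][::-1]
  pvInterleave front back

-- ===== PRECONDITION & SPEC =====
def Spec_sort_and_alternate (arr : List Int) (out : List Int) : Prop := out = sort_and_alternate_alt arr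
instance (arr : List Int) (out : List Int) : Decidable (Spec_sort_and_alternate arr out) := by unfold Spec_sort_and_alternate; infer_instance

-- ===== CLAIM (what is proved, stated in full; the proofs are below) =====
def Claim_equal_sort_and_alternate : Prop := ∀ (arr : List Int), Dom_sort_and_alternate arr → Spec_sort_and_alternate arr (sort_and_alternate arr)

-- ===== LEMMAS AND PROOFS =====

-- Reference shape: first element, last element, recurse on the middle.
def pvG : List Int → List Int
  | [] => []
  | x :: xs =>
    if h : xs = [] then [x]
    else x :: xs.getLast h :: pvG xs.dropLast
termination_by s => s.length
decreasing_by simp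

@[simp] theorem pvG_nil : pvG [] = [] := by unfold pvG; rfl

@[simp] theorem pvG_single (x : Int) : pvG [x] = [x] := by unfold pvG; simp

theorem pvG_concat (x z : Int) (mid : List Int) :
    pvG (x :: (mid ++ [z])) = x :: z :: pvG mid := by
  unfold pvG
  simp
  conv_lhs => unfold pvG

theorem pv_take_last (l : List Int) (m : Nat) (h : m < l.length) :
    l.take (m + 1) = l.take m ++ [l[m]'h] := by
  rw [List.take_add_one, List.getElem?_eq_getElem h]
  simp

theorem pv_seg_decomp (s : List Int) (a K b : Nat) (h2 : 2 ≤ K) (hlen : a + K ≤ s.length)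
    (hb : b = a + K - 1) (hbl : b < s.length) :
    (s.drop a).take K =
      s[a]'(by omega) :: (((s.drop (a + 1)).take (K - 2)) ++ [s[b]'hbl]) := by
  have ha : a < s.length := by omega
  rw [List.drop_eq_getElem_cons ha]
  have e : K = (K - 2) + 1 + 1 := by omega
  conv_lhs => rw [e]
  rw [List.take_succ_cons]
  congr 1
  rw [pv_take_last (s.drop (a + 1)) (K - 2) (by simp; omega)]
  congr 2
  have h1 : (s.drop (a + 1))[K - 2]'(by simp; omega) = s[b]'hbl := by
    have : (s.drop (a + 1))[K - 2]? = s[a + 1 + (K - 2)]? := List.getElem?_drop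
    have hx : a + 1 + (K - 2) = b := by omega
    rw [hx] at this
    rw [List.getElem?_eq_getElem (l := s.drop (a+1)) (by simp; omega),
        List.getElem?_eq_getElem hbl] at this
    exact Option.some.inj this
  exact h1

theorem pvALoop_eq : ∀ (k : Nat) (s out : List Int) (i j : Int),
    (j - i + 1).toNat = k → 0 ≤ i → j < (s.length : Int) →
    pvALoop s i j out = out ++ pvG ((s.drop i.toNat).take (j - i + 1).toNat) := by
  intro k
  induction k using Nat.strong_induction_on with
  | _ k ih =>
    intro s out i j hk hi hj
    rw [pvALoop]
    by_cases hij : i ≤ j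
    · rw [if_pos hij]
      have hiN : i.toNat < s.length := by omega
      have hgi : PySem.List.pyGetD s i 0 = s[i.toNat] :=
        PySem.List.pyGetD_eq_getElem _ _ hi (by omega)
      by_cases heq : i = j
      · subst heq
        rw [if_pos rfl]
        rw [pvALoop, if_neg (by omega)]
        have hseg : (s.drop i.toNat).take (i - i + 1).toNat = [s[i.toNat]] := by
          have h1 : (i - i + 1).toNat = 1 := by omega
          rw [h1, List.drop_eq_getElem_cons hiN]
          rfl
        rw [hseg, hgi]
        simp
      · rw [if_neg heq]
        have hjN : 0 ≤ j := by omega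
        have hgj : PySem.List.pyGetD s j 0 = s[j.toNat] :=
          PySem.List.pyGetD_eq_getElem _ _ hjN (by omega)
        have hk2 : (j - 1 - (i + 1) + 1).toNat < k := by omega
        rw [ih _ hk2 s _ (i + 1) (j - 1) rfl (by omega) (by omega)]
        rw [pv_seg_decomp s i.toNat (j - i + 1).toNat j.toNat (by omega) (by omega)
              (by omega) (by omega)]
        have e1 : (i + 1).toNat = i.toNat + 1 := by omega
        have e2 : (j - 1 - (i + 1) + 1).toNat = (j - i + 1).toNat - 2 := by omega
        rw [e1, e2, pvG_concat, hgi, hgj]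
        simp
    · rw [if_neg hij]
      have h0 : (j - i + 1).toNat = 0 := by omega
      rw [h0]
      simp

theorem pvInterleave_eq_pvG : ∀ (n : Nat) (s : List Int), s.length = n →
    pvInterleave (s.take ((s.length + 1) / 2)) ((s.drop ((s.length + 1) / 2)).reverse) = pvG s := by
  intro n
  induction n using Nat.strong_induction_on with
  | _ n ih =>
    intro s hn
    match s with
    | [] => simp [pvInterleave]
    | [x] => simp [pvInterleave]
    | x :: y :: xs =>
      have hne : (y :: xs) ≠ [] := by simp
      obtain ⟨ys, z, hyz⟩ : ∃ ys z, y :: xs = ys ++ [z] :=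
        ⟨(y :: xs).dropLast, (y :: xs).getLast hne, (List.dropLast_append_getLast hne).symm⟩
      rw [hyz] at hn ⊢
      have hlen : (x :: (ys ++ [z])).length = ys.length + 2 := by simp
      have hh : ((x :: (ys ++ [z])).length + 1) / 2 = (ys.length + 1) / 2 + 1 := by
        rw [hlen]; omega
      rw [hh]
      have htk : (x :: (ys ++ [z])).take ((ys.length + 1) / 2 + 1)
          = x :: ys.take ((ys.length + 1) / 2) := by
        rw [List.take_succ_cons, List.take_append_of_le_length (by omega)]
      have hdr : (x :: (ys ++ [z])).drop ((ys.length + 1) / 2 + 1)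
          = ys.drop ((ys.length + 1) / 2) ++ [z] := by
        rw [List.drop_succ_cons, List.drop_append_of_le_length (by omega)]
      rw [htk, hdr]
      have hrev : (ys.drop ((ys.length + 1) / 2) ++ [z]).reverse
          = z :: (ys.drop ((ys.length + 1) / 2)).reverse := by simp
      rw [hrev]
      simp only [pvInterleave]
      rw [pvG_concat]
      have hm : ys.length < n := by omega
      rw [ih ys.length hm ys rfl]

theorem sort_and_alternate_common (arr : List Int) :
    sort_and_alternate arr = sort_and_alternate_alt arr := by
  unfold sort_and_alternate sort_and_alternate_alt
  dsimp only
  generalize PySem.List.sorted arr (fun x => x) false = s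
  have hfd : PySem.Int.floordiv ((s.length : Int) + 1) 2 = (((s.length + 1) / 2 : Nat) : Int) := by
    have h1 : ((s.length : Int) + 1) = (((s.length + 1 : Nat)) : Int) := by push_cast; ring
    rw [h1]
    exact_mod_cast PySem.Int.floordiv_natCast (s.length + 1) 2
  rw [hfd, PySem.List.slice_to_natCast, PySem.List.slice_from_natCast]
  rw [pvInterleave_eq_pvG s.length s rfl]
  rw [pvALoop_eq (((s.length : Int) - 1) - 0 + 1).toNat s [] 0 ((s.length : Int) - 1) rfl
        (by omega) (by omega)]
  have e : (((s.length : Int) - 1) - 0 + 1).toNat = s.length := by omega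
  rw [e]
  simp

-- ===== VERDICT (by name: the statement is the Claim_ definition above) =====
theorem sort_and_alternate_spec : Claim_equal_sort_and_alternate := by
  intro arr _
  unfold Spec_sort_and_alternate
  exact sort_and_alternate_common arr
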